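-- pv_equiv track=rewrite | github.com/pepo999/advent-of-code | advent.py | possible_lines
-- ===== SOURCE A (Python) =====
-- from itertools import product
--
-- def possible_lines(input_string):
--     possible_values = ['.', '#']
--     combinations = product(possible_values, repeat=input_string.count('?'))
--     result_strings = []
--     for combination in combinations:
--         result = ''
--         for char in input_string:
--             if char == '?':
--                 result += combination[0]
--                 combination = combination[1:] + combination[:1]
--             else:
--                 result += char
--         result_strings.append(result)
--     return result_strings
-- ===== SOURCE B (Python) =====
-- def possible_lines(input_string):
--     if '?' not in input_string:
--         return [input_string]
--     prefix, rest = input_string.split('?', 1)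
--     tails = possible_lines(rest)
--     return [prefix + '.' + t for t in tails] + [prefix + '#' + t for t in tails]
-- ===== Notes on version B (the rewrite author's own statement) =====
-- stated objective: faster
-- what changed: B replaces the materialised itertools.product over all 2^k tuples plus a per-character rotating-tuple substitution loop with a recursion that splits at the first question mark once per branch, building each result with native string slicing/concatenation instead of a Python-level character loop; results come out in the same order.
import Mathlib
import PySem

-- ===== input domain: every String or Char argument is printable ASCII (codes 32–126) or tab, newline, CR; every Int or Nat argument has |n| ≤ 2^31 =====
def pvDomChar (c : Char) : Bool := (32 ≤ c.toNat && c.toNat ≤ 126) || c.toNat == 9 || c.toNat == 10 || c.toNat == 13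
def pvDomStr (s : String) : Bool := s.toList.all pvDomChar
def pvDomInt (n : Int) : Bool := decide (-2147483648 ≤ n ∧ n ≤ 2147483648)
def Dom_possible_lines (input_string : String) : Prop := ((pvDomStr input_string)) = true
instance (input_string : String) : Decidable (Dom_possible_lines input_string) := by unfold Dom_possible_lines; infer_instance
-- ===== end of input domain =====

-- B replaces A's materialised itertools.product + rotating-tuple substitution loop by a direct
-- structural recursion on the string (branch once per '?'); same results in the same order.

-- ===== PORT A =====
-- itertools.product(['.','#'], repeat=n), ported as the standard recursive expansion
-- (first component varies slowest, '.' before '#', exactly itertools' order).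
def prodRepA : Nat → List (List Char)
  | 0 => [[]]
  | n + 1 => (prodRepA n).map (fun t => '.' :: t) ++ (prodRepA n).map (fun t => '#' :: t)

-- the body of A's inner 'for char in input_string' loop; state = (result, combination)
def stepA (st : List Char × List Char) (ch : Char) : List Char × List Char :=
  if ch = '?' then
    match st.2 with
    | [] => (st.1, [])                 -- Python would raise IndexError here; unreachable (tuple length = number of '?')
    | c :: cs => (st.1 ++ [c], cs ++ [c])  -- result += combination[0]; combination = combination[1:] + combination[:1]
  else (st.1 ++ [ch], st.2)

def possible_lines (input_string : String) : List String :=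
  let combinations := prodRepA (PySem.Str.count input_string "?")
  combinations.foldl
    (fun result_strings combination =>
      result_strings ++ [String.mk (input_string.toList.foldl stepA ([], combination)).1])
    []

-- ===== PORT B =====
-- Source B on List Char: if '?' not in l return [l]; else split at the first '?' and branch.
def altGo (l : List Char) : List (List Char) :=
  if h : '?' ∈ l then
    let pre := l.takeWhile (fun c => c ≠ '?')       -- s.split('?', 1)[0]
    let rest := (l.dropWhile (fun c => c ≠ '?')).tail  -- s.split('?', 1)[1]
    let tails := altGo rest
    tails.map (fun t => pre ++ '.' :: t) ++ tails.map (fun t => pre ++ '#' :: t)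
  else [l]
termination_by l.length
decreasing_by
  have hne : l.dropWhile (fun c => c ≠ '?') ≠ [] := by
    intro hnil
    have := (List.dropWhile_eq_nil_iff).1 hnil '?' h
    simp at this
  have h1 : (l.dropWhile (fun c => c ≠ '?')).tail.length < (l.dropWhile (fun c => c ≠ '?')).length := by
    cases hd : l.dropWhile (fun c => c ≠ '?') with
    | nil => exact absurd hd hne
    | cons a t => simp
  exact lt_of_lt_of_le h1 (List.length_dropWhile_le _ _)

def possible_lines_alt (input_string : String) : List String :=
  (altGo input_string.toList).map String.mk

-- ===== PRECONDITION & SPEC =====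
def Spec_possible_lines (input_string : String) (out : List String) : Prop := out = possible_lines_alt input_string
instance (input_string : String) (out : List String) : Decidable (Spec_possible_lines input_string out) := by unfold Spec_possible_lines; infer_instance

-- ===== CLAIM (what is proved, stated in full; the proofs are below) =====
def Claim_equal_possible_lines : Prop := ∀ (input_string : String), Dom_possible_lines input_string → Spec_possible_lines input_string (possible_lines input_string)

-- ===== LEMMAS AND PROOFS =====

-- substitute the '?'-slots of l, left to right, with the elements of comb
def fillA : List Char → List Char → List Char
  | [], _ => []
  | x :: xs, comb =>
    if x = '?' then
      (match comb with
       | [] => []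
       | c :: cs => c :: fillA xs cs)
    else x :: fillA xs comb

theorem fillA_append (l : List Char) : ∀ (cs ys : List Char),
    l.count '?' ≤ cs.length → fillA l (cs ++ ys) = fillA l cs := by
  induction l with
  | nil => intro cs ys _; simp [fillA]
  | cons x xs ih =>
    intro cs ys h
    by_cases hx : x = '?'
    · subst hx
      cases cs with
      | nil => simp at h
      | cons c cs' =>
        simp [fillA]
        exact ih cs' ys (by simp at h; omega)
    · simp [fillA, hx]
      exact ih cs ys (by simpa [List.count_cons, hx] using h)

theorem foldl_stepA (l : List Char) : ∀ (acc comb : List Char),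
    l.count '?' ≤ comb.length → (l.foldl stepA (acc, comb)).1 = acc ++ fillA l comb := by
  induction l with
  | nil => intro acc comb _; simp [fillA]
  | cons x xs ih =>
    intro acc comb h
    by_cases hx : x = '?'
    · subst hx
      cases comb with
      | nil => simp at h
      | cons c cs =>
        have hle : xs.count '?' ≤ cs.length := by
          simp at h; omega
        simp only [List.foldl_cons]
        rw [show stepA (acc, c :: cs) '?' = (acc ++ [c], cs ++ [c]) from by simp [stepA]]
        rw [ih (acc ++ [c]) (cs ++ [c]) (by simp; omega)]
        rw [fillA_append xs cs [c] hle]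
        simp [fillA]
    · simp only [List.foldl_cons, stepA, if_neg hx]
      rw [ih (acc ++ [x]) comb (by simpa [List.count_cons, hx] using h)]
      simp [fillA, hx]

theorem mem_prodRepA_length : ∀ (n : Nat) (comb : List Char), comb ∈ prodRepA n → comb.length = n := by
  intro n
  induction n with
  | zero => intro comb h; simp [prodRepA] at h; simp [h]
  | succ n ih =>
    intro comb h
    simp [prodRepA] at h
    rcases h with ⟨t, ht, rfl⟩ | ⟨t, ht, rfl⟩ <;> simp [ih t ht]

theorem fillA_no_q (l : List Char) (h : '?' ∉ l) : ∀ comb, fillA l comb = l := by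
  induction l with
  | nil => intro comb; simp [fillA]
  | cons x xs ih =>
    intro comb
    have hx : x ≠ '?' := fun hh => h (hh ▸ List.mem_cons_self)
    simp [fillA, hx, ih (fun hm => h (List.mem_cons_of_mem _ hm))]

theorem fillA_split (p : List Char) (hp : '?' ∉ p) : ∀ (r : List Char) (c : Char) (cs : List Char),
    fillA (p ++ '?' :: r) (c :: cs) = p ++ c :: fillA r cs := by
  induction p with
  | nil => intro r c cs; simp [fillA]
  | cons x xs ih =>
    intro r c cs
    have hx : x ≠ '?' := fun hh => hp (hh ▸ List.mem_cons_self)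
    simp [fillA, hx, ih (fun hm => hp (List.mem_cons_of_mem _ hm))]

theorem altGo_eq_aux (n : Nat) : ∀ (l : List Char), l.length ≤ n →
    altGo l = (prodRepA (l.count '?')).map (fillA l) := by
  induction n with
  | zero =>
    intro l hl
    have : l = [] := List.eq_nil_of_length_eq_zero (Nat.le_zero.1 hl)
    subst this
    rw [altGo]
    simp [prodRepA, fillA]
  | succ n ih =>
    intro l hl
    by_cases h : '?' ∈ l
    · have hne : l.dropWhile (fun c => c ≠ '?') ≠ [] := by
        intro hnil
        have := (List.dropWhile_eq_nil_iff).1 hnil '?' h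
        simp at this
      obtain ⟨r, hd⟩ : ∃ r, l.dropWhile (fun c => c ≠ '?') = '?' :: r := by
        cases hdw : l.dropWhile (fun c => c ≠ '?') with
        | nil => exact absurd hdw hne
        | cons a t =>
          refine ⟨t, ?_⟩
          have ha := List.head_dropWhile_not (fun c : Char => decide (c ≠ '?')) (l := l) hne
          simp only [hdw, List.head_cons] at ha
          simp at ha
          simp [ha]
      set p := l.takeWhile (fun c => c ≠ '?') with hpdef
      have hp : '?' ∉ p := by
        intro hm
        have := List.mem_takeWhile_imp hm
        simp at this
      have hsplit : l = p ++ '?' :: r := by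
        rw [hpdef, ← hd, List.takeWhile_append_dropWhile]
      have hcount : l.count '?' = r.count '?' + 1 := by
        rw [hsplit]
        simp [List.count_append, List.count_eq_zero_of_not_mem hp]
      have hrlen : r.length ≤ n := by
        have hlen : l.length = p.length + (r.length + 1) := by rw [hsplit]; simp
        omega
      rw [show altGo l = (altGo r).map (fun t => p ++ '.' :: t) ++ (altGo r).map (fun t => p ++ '#' :: t) from by
        rw [altGo]; rw [dif_pos h, ← hpdef, hd]; rfl]
      rw [ih r hrlen, hcount]
      rw [show prodRepA (r.count '?' + 1) = (prodRepA (r.count '?')).map (fun t => '.' :: t) ++ (prodRepA (r.count '?')).map (fun t => '#' :: t) from rfl]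
      conv_rhs => rw [hsplit]
      simp only [List.map_append, List.map_map]
      congr 1 <;>
        exact List.map_congr_left (fun cs _ => by
          simp only [Function.comp]
          rw [fillA_split p hp])
    · rw [altGo]
      rw [dif_neg h]
      rw [List.count_eq_zero_of_not_mem h]
      simp [prodRepA, fillA_no_q l h]

theorem altGo_eq (l : List Char) : altGo l = (prodRepA (l.count '?')).map (fillA l) :=
  altGo_eq_aux l.length l le_rfl

-- Chars.count.go for a single-character needle is List.count
theorem count_go_single (c : Char) : ∀ (l : List Char) (fuel acc : Nat),
    l.length ≤ fuel → PySem.Chars.count.go [c] fuel l acc = acc + l.count c := by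
  intro l
  induction l with
  | nil =>
    intro fuel acc _
    cases fuel <;> simp [PySem.Chars.count.go]
  | cons h t ih =>
    intro fuel acc hle
    cases fuel with
    | zero => simp at hle
    | succ fuel =>
      rw [PySem.Chars.count.go]
      by_cases hc : c = h
      · subst hc
        rw [show ([c].isPrefixOf (c :: t)) = true from by simp [List.isPrefixOf]]
        simp only [if_pos, List.length_cons, List.length_nil, List.drop_succ_cons,
          List.drop_zero]
        rw [ih fuel (acc + 1) (by simpa using hle)]
        simp
        omega
      · rw [show ([c].isPrefixOf (h :: t)) = false from by
          simp [List.isPrefixOf]; exact fun hh => hc hh]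
        simp only [Bool.false_eq_true, if_false]
        rw [ih fuel acc (by simpa using hle)]
        simp [List.count_cons]
        exact fun hh => absurd hh.symm hc

theorem str_count_qmark (s : String) : PySem.Str.count s "?" = s.toList.count '?' := by
  show PySem.Chars.count s.toList "?".toList = _
  have : "?".toList = ['?'] := rfl
  rw [this]
  unfold PySem.Chars.count
  simp only [List.isEmpty_cons, if_false, Bool.false_eq_true]
  simpa using count_go_single '?' s.toList s.toList.length 0 le_rfl

-- ===== VERDICT (by name: the statement is the Claim_ definition above) =====
theorem possible_lines_spec : Claim_equal_possible_lines := by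
  intro s _
  show possible_lines s = possible_lines_alt s
  unfold possible_lines possible_lines_alt
  rw [PySem.List.foldl_append_singleton_eq_map]
  rw [str_count_qmark, altGo_eq]
  simp only [List.map_map, List.nil_append]
  apply List.map_congr_left
  intro comb hcomb
  have hlen : comb.length = s.toList.count '?' := mem_prodRepA_length _ comb hcomb
  simp only [Function.comp]
  rw [foldl_stepA s.toList [] comb (by omega)]
  simp
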